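-- pv_equiv track=rewrite | github.com/ryanh121/translation-based-retrieval-model | create_inverted_index.py | posting2lexicon
-- ===== SOURCE A (Python) =====
-- def posting2lexicon(myposting:list):
--     d = {}
--     for i,value in enumerate(myposting):
--         if value[0] in d:
--             d[value[0]][0] += 1
--         else:
--             d[value[0]] = [1]
--             d[value[0]].append(i)
--     return d
-- ===== SOURCE B (Python) =====
-- def posting2lexicon(myposting: list):
--     counts = {}
--     for value in myposting:
--         counts[value[0]] = counts.get(value[0], 0) + 1
--     first = {}
--     for i, value in enumerate(myposting):
--         first.setdefault(value[0], i)
--     return {k: [counts[k], i] for k, i in first.items()}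
-- ===== Notes on version B (the rewrite author's own statement) =====
-- stated objective: alternative
-- what changed: A builds [count, first-index] records in one interleaved loop with an in-dict branch mutating list cells; B computes term counts and first positions in two independent passes (a counting table and a setdefault pass) and assembles the result with a dict comprehension.
import Mathlib
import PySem

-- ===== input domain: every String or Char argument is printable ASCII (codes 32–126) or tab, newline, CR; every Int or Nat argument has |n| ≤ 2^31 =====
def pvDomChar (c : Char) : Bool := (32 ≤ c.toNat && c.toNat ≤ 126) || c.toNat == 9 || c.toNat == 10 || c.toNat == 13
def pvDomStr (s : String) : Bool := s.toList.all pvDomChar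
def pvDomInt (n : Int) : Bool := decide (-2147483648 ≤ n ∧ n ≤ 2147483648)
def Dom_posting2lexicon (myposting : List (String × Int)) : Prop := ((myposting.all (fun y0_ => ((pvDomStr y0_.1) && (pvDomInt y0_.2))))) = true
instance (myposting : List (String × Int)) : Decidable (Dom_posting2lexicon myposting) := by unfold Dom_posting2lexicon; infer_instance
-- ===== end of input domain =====

-- B replaces A's single interleaved loop with two independent passes (counts, first positions) plus an assembly comprehension; same cost, alternative decomposition.

-- ===== PORT A =====
-- loop body of A: one iteration of 'for i,value in enumerate(myposting): …'
def pvStepA (d : PySem.Dict String (List Int)) (iv : Int × (String × Int)) : PySem.Dict String (List Int) :=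
  if d.contains iv.2.1 then
    -- d[value[0]][0] += 1
    d.modify iv.2.1 [] (fun l => match l with | c :: r => (c + 1) :: r | [] => [])
  else
    -- d[value[0]] = [1]; d[value[0]].append(i)
    (d.insert iv.2.1 [1]).modify iv.2.1 [] (fun l => l ++ [iv.1])

def posting2lexicon (myposting : List (String × Int)) : List (String × List Int) :=
  ((PySem.List.enumerate myposting).foldl pvStepA PySem.Dict.empty).items

-- ===== PORT B =====
-- loop body of B's first pass: counts[value[0]] = counts.get(value[0], 0) + 1
def pvStepC (c : PySem.Dict String Int) (v : String × Int) : PySem.Dict String Int :=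
  c.insert v.1 (c.getD v.1 0 + 1)
-- loop body of B's second pass: first.setdefault(value[0], i)
def pvStepF (f : PySem.Dict String Int) (iv : Int × (String × Int)) : PySem.Dict String Int :=
  f.setdefault iv.2.1 iv.1

def posting2lexicon_alt (myposting : List (String × Int)) : List (String × List Int) :=
  let counts := myposting.foldl pvStepC PySem.Dict.empty
  let first := (PySem.List.enumerate myposting).foldl pvStepF PySem.Dict.empty
  -- {k: [counts[k], i] for k, i in first.items()}
  (first.items.foldl (fun d p => d.insert p.1 [counts.getD p.1 0, p.2]) PySem.Dict.empty).items

-- ===== PRECONDITION & SPEC =====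
def Spec_posting2lexicon (myposting : List (String × Int)) (out : List (String × List Int)) : Prop := out = posting2lexicon_alt myposting
instance (myposting : List (String × Int)) (out : List (String × List Int)) : Decidable (Spec_posting2lexicon myposting out) := by unfold Spec_posting2lexicon; infer_instance

-- ===== CLAIM (what is proved, stated in full; the proofs are below) =====
def Claim_equal_posting2lexicon : Prop := ∀ (myposting : List (String × Int)), Dom_posting2lexicon myposting → Spec_posting2lexicon myposting (posting2lexicon myposting)

-- ===== LEMMAS AND PROOFS =====

-- A's accumulator is the pointwise [running count, first index] view of B's two tables.
lemma pv_loop (l : List (String × Int)) :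
    ∀ (n : Int) (dA : PySem.Dict String (List Int)) (dC dF : PySem.Dict String Int),
    dA.items = dF.items.map (fun p => (p.1, [dC.getD p.1 0, p.2])) →
    (∀ k, dC.contains k = dF.contains k) →
    dF.keys.Nodup →
    (((PySem.List.enumerate l n).foldl pvStepA dA).items
       = ((PySem.List.enumerate l n).foldl pvStepF dF).items.map
           (fun p => (p.1, [(l.foldl pvStepC dC).getD p.1 0, p.2]))
     ∧ (∀ k, (l.foldl pvStepC dC).contains k = ((PySem.List.enumerate l n).foldl pvStepF dF).contains k)
     ∧ ((PySem.List.enumerate l n).foldl pvStepF dF).keys.Nodup) := by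
  induction l with
  | nil =>
    intro n dA dC dF h1 h2 h3
    simpa [PySem.List.enumerate_nil] using ⟨h1, h2, h3⟩
  | cons v rest ih =>
    intro n dA dC dF h1 h2 h3
    rw [PySem.List.enumerate_cons]
    simp only [List.foldl_cons]
    have hcontA : ∀ k, dA.contains k = dF.contains k := by
      intro k
      simp [PySem.Dict.contains, h1, List.any_map, Function.comp_def]
    by_cases h : dF.contains v.1 = true
    · -- key already present: A increments the stored count; B's tables: counts[v]+1, first unchanged
      have hC : dC.contains v.1 = true := by rw [h2]; exact h
      obtain ⟨i, hi⟩ : ∃ i, dF.get? v.1 = some i := by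
        have hs := PySem.Dict.contains_eq_isSome_get? (d := dF) (k := v.1)
        rw [h] at hs
        exact Option.isSome_iff_exists.mp hs.symm
      have himem : (v.1, i) ∈ dF.items := PySem.Dict.mem_items_of_get?_eq_some dF hi
      have hkeysA : dA.keys = dF.keys := by
        simp [PySem.Dict.keys, h1, List.map_map, Function.comp]
      have hgetA : dA.get? v.1 = some [dC.getD v.1 0, i] := by
        apply PySem.Dict.get?_of_mem_items
        · rw [h1]
          exact List.mem_map_of_mem himem
        · rw [hkeysA]; exact h3
      have hstepA : pvStepA dA (n, v) = dA.insert v.1 [dC.getD v.1 0 + 1, i] := by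
        simp [pvStepA, hcontA v.1, h, PySem.Dict.modify, PySem.Dict.getD_eq_get?_getD, hgetA]
      have hstepF : pvStepF dF (n, v) = dF := by simpa [pvStepF] using PySem.Dict.setdefault_of_contains dF n h
      rw [hstepA, hstepF]
      apply ih
      · rw [PySem.Dict.items_insert_of_contains dA _ (by rw [hcontA]; exact h), h1, List.map_map]
        apply List.map_congr_left
        intro p hp
        by_cases hpk : p.1 = v.1
        · have hp2 : p.2 = i := by
            have e1 : dF.get? p.1 = some p.2 :=
              PySem.Dict.get?_of_mem_items dF (by simpa using hp) h3
            rw [hpk, hi] at e1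
            simpa using e1.symm
          simp [pvStepC, Function.comp, hpk, hp2]
        · simp [pvStepC, Function.comp, hpk, PySem.Dict.getD_insert]
      · intro k
        rw [pvStepC, PySem.Dict.contains_insert]
        by_cases hk : k = v.1
        · simp [hk, h]
        · simp [hk, h2 k]
      · exact h3
    · -- fresh key: A appends (v, [1, n]); B: counts[v] = 1, first[v] = n
      have h' : dF.contains v.1 = false := by simpa using h
      have hCf : dC.contains v.1 = false := by rw [h2]; exact h'
      have hAf : dA.contains v.1 = false := by rw [hcontA]; exact h'
      have hnoA : ∀ p ∈ dA.items, (p.1 == v.1) = false := by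
        intro p hp
        have hb := hAf
        simp only [PySem.Dict.contains, List.any_eq_false] at hb
        simpa using hb p hp
      have hnoF : ∀ p ∈ dF.items, p.1 ≠ v.1 := by
        intro p hp
        have hb := h'
        simp only [PySem.Dict.contains, List.any_eq_false] at hb
        simpa using hb p hp
      have hstepA : (pvStepA dA (n, v)).items = dA.items ++ [(v.1, [1, n])] := by
        have h1i : (dA.insert v.1 [1]).items = dA.items ++ [(v.1, [1])] :=
          PySem.Dict.items_insert_of_not_contains dA _ hAf
        have hc1 : (dA.insert v.1 [1]).contains v.1 = true :=
          PySem.Dict.contains_insert_self dA v.1 [1]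
        have hg1 : (dA.insert v.1 [1]).getD v.1 [] = [1] := by
          simp
        simp only [pvStepA, hAf, Bool.false_eq_true, if_false, PySem.Dict.modify, hg1]
        rw [PySem.Dict.items_insert_of_contains _ _ hc1, h1i, List.map_append]
        congr 1
        · calc dA.items.map (fun p => if (p.1 == v.1) = true then (v.1, [1] ++ [n]) else p)
              = dA.items.map id := List.map_congr_left (fun p hp => by simp [hnoA p hp])
            _ = dA.items := List.map_id _
        · simp
      have hstepF : pvStepF dF (n, v) = dF.insert v.1 n := by
        simpa [pvStepF] using PySem.Dict.setdefault_of_not_contains dF n h'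
      have hstepFi : (pvStepF dF (n, v)).items = dF.items ++ [(v.1, n)] := by
        rw [hstepF]
        exact PySem.Dict.items_insert_of_not_contains dF n h'
      have hitems1 : (pvStepA dA (n, v)).items
          = (pvStepF dF (n, v)).items.map
              (fun p => (p.1, [(pvStepC dC v).getD p.1 0, p.2])) := by
        rw [hstepA, hstepFi, List.map_append, h1]
        congr 1
        · apply List.map_congr_left
          intro p hp
          have hpk := hnoF p hp
          simp [pvStepC, PySem.Dict.getD_insert, hpk]
        · simp [pvStepC, PySem.Dict.getD_insert,
            PySem.Dict.getD_of_not_contains dC 0 hCf]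
      have hcont1 : ∀ k, (pvStepC dC v).contains k = (pvStepF dF (n, v)).contains k := by
        intro k
        rw [pvStepC, hstepF, PySem.Dict.contains_insert, PySem.Dict.contains_insert]
        by_cases hk : k = v.1
        · simp [hk]
        · simp [h2 k]
      have hnod1 : (pvStepF dF (n, v)).keys.Nodup := by
        rw [hstepF, PySem.Dict.keys_insert_of_not_contains dF n h']
        refine List.Nodup.append h3 (List.nodup_singleton _) ?_
        intro a ha hb
        simp only [List.mem_singleton] at hb
        rw [hb] at ha
        exact absurd ((PySem.Dict.contains_iff_mem_keys dF v.1).mpr ha) (by simp [h'])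
      exact ih (n + 1) _ _ _ hitems1 hcont1 hnod1

-- ===== VERDICT (by name: the statement is the Claim_ definition above) =====
theorem posting2lexicon_spec : Claim_equal_posting2lexicon := by
  intro l _
  show posting2lexicon l = posting2lexicon_alt l
  obtain ⟨h1, _, h3⟩ := pv_loop l 0 PySem.Dict.empty PySem.Dict.empty PySem.Dict.empty
    (by rfl) (fun k => rfl) PySem.Dict.nodup_keys_empty
  simp only [posting2lexicon, posting2lexicon_alt]
  rw [h1]
  have hf := PySem.Dict.items_foldl_insert_fresh
    ((PySem.List.enumerate l).foldl pvStepF PySem.Dict.empty).items (fun p => p.1)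
    (fun p => [(l.foldl pvStepC PySem.Dict.empty).getD p.1 0, p.2]) PySem.Dict.empty
    (fun a _ => by simp) (by simpa [PySem.Dict.keys] using h3)
  simp only [hf]
  simp [PySem.Dict.empty]
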